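-- pv_equiv track=rewrite | github.com/mod96/hiddenlayer | CodingTestExamples/Programmers/2018_Summer&Winter_coding fest/Landscape Edit - USE MATH!!!.py | return_price
-- ===== SOURCE A (Python) =====
-- def return_price(land, P, Q, h):
--     price = 0
--     for row in land:
--         for targ in row:
--             if targ > h:
--                 price += (targ - h) * Q
--             elif targ < h:
--                 price += (h - targ) * P
--     return price
-- ===== SOURCE B (Python) =====
-- def return_price(land, P, Q, h):
--     cells = sorted(c for row in land for c in row)
--     n = len(cells)
--     # binary search: first index with cells[idx] >= h
--     lo, hi = 0, n
--     while lo < hi: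
--         mid = (lo + hi) // 2
--         if cells[mid] < h:
--             lo = mid + 1
--         else:
--             hi = mid
--     i = lo
--     # binary search: first index with cells[idx] > h
--     lo, hi = i, n
--     while lo < hi:
--         mid = (lo + hi) // 2
--         if cells[mid] <= h:
--             lo = mid + 1
--         else:
--             hi = mid
--     j = lo
--     below = h * i - sum(cells[:i])
--     above = sum(cells[j:]) - h * (n - j)
--     return above * Q + below * P
-- ===== Notes on version B (the rewrite author's own statement) =====
-- stated objective: alternative
-- what changed: B sorts the flattened grid, locates the h-boundary with two hand-written binary searches, and computes the answer in closed form from two block sums (h*i - prefix_sum and suffix_sum - h*(n-j)), instead of A's per-cell branch-and-multiply accumulator.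
import Mathlib
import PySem

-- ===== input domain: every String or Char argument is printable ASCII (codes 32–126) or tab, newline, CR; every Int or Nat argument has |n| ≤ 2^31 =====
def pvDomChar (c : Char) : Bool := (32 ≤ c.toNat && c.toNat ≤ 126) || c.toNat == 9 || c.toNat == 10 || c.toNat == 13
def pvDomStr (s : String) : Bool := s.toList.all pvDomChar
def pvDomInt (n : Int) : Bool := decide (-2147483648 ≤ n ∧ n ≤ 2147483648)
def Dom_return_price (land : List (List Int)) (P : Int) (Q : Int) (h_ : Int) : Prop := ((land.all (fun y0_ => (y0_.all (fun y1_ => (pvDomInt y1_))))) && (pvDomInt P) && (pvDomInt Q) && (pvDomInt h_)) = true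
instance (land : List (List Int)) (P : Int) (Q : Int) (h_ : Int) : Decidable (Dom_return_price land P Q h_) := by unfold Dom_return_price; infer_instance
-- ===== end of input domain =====

-- B sorts the flattened grid, finds the h-boundary with two binary searches and computes the
-- answer in closed form from two block sums, instead of A's per-cell accumulator (objective: alternative).

-- ===== PORT A =====
def return_price (land : List (List Int)) (P : Int) (Q : Int) (h_ : Int) : Int :=
  land.foldl (fun price row =>
    row.foldl (fun price targ =>
      if targ > h_ then price + (targ - h_) * Q
      else if targ < h_ then price + (h_ - targ) * P
      else price) price) 0

-- ===== PORT B =====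
-- `while lo < hi: mid = (lo+hi)//2; if cells[mid] < h: lo = mid+1 else: hi = mid`
-- (mid is always in range here, so the total pyGetD ports cells[mid] exactly)
def pvBsLt (cells : List Int) (h_ : Int) (lo hi : Int) : Int :=
  if hlt : lo < hi then
    let mid := PySem.Int.floordiv (lo + hi) 2
    if PySem.List.pyGetD cells mid 0 < h_ then pvBsLt cells h_ (mid + 1) hi
    else pvBsLt cells h_ lo mid
  else lo
termination_by (hi - lo).toNat
decreasing_by
  · have := PySem.Int.floordiv_two_mid_bounds (le_of_lt hlt)
    omega
  · have h1 : PySem.Int.floordiv (lo + hi) 2 < hi := by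
      rw [PySem.Int.floordiv_lt_iff_lt_mul (by omega)]; omega
    have := PySem.Int.floordiv_two_mid_bounds (le_of_lt hlt)
    omega

-- second loop: `if cells[mid] <= h: lo = mid+1 else: hi = mid`
def pvBsLe (cells : List Int) (h_ : Int) (lo hi : Int) : Int :=
  if hlt : lo < hi then
    let mid := PySem.Int.floordiv (lo + hi) 2
    if PySem.List.pyGetD cells mid 0 ≤ h_ then pvBsLe cells h_ (mid + 1) hi
    else pvBsLe cells h_ lo mid
  else lo
termination_by (hi - lo).toNat
decreasing_by
  · have := PySem.Int.floordiv_two_mid_bounds (le_of_lt hlt)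
    omega
  · have h1 : PySem.Int.floordiv (lo + hi) 2 < hi := by
      rw [PySem.Int.floordiv_lt_iff_lt_mul (by omega)]; omega
    have := PySem.Int.floordiv_two_mid_bounds (le_of_lt hlt)
    omega

def return_price_alt (land : List (List Int)) (P : Int) (Q : Int) (h_ : Int) : Int :=
  let cells := PySem.List.sorted (land.flatMap (fun row => row)) (fun c => c) false
  let n : Int := cells.length
  let i := pvBsLt cells h_ 0 n
  let j := pvBsLe cells h_ i n
  let below := h_ * i - (PySem.List.slice cells none (some i)).sum
  let above := (PySem.List.slice cells (some j) none).sum - h_ * (n - j)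
  above * Q + below * P

-- ===== PRECONDITION & SPEC =====
def Spec_return_price (land : List (List Int)) (P : Int) (Q : Int) (h_ : Int) (out : Int) : Prop := out = return_price_alt land P Q h_
instance (land : List (List Int)) (P : Int) (Q : Int) (h_ : Int) (out : Int) : Decidable (Spec_return_price land P Q h_ out) := by unfold Spec_return_price; infer_instance

-- ===== CLAIM (what is proved, stated in full; the proofs are below) =====
def Claim_equal_return_price : Prop := ∀ (land : List (List Int)) (P : Int) (Q : Int) (h_ : Int), Dom_return_price land P Q h_ → Spec_return_price land P Q h_ (return_price land P Q h_)

-- ===== LEMMAS AND PROOFS =====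

-- per-cell contribution in A
def pvCell (P Q h_ targ : Int) : Int :=
  if targ > h_ then (targ - h_) * Q else if targ < h_ then (h_ - targ) * P else 0

lemma inner_foldl_eq (P Q h_ : Int) (row : List Int) (acc : Int) :
    row.foldl (fun price targ =>
      if targ > h_ then price + (targ - h_) * Q
      else if targ < h_ then price + (h_ - targ) * P
      else price) acc = acc + (row.map (pvCell P Q h_)).sum := by
  induction row generalizing acc with
  | nil => simp
  | cons x xs ih =>
    simp only [List.foldl_cons, List.map_cons, List.sum_cons, ih, pvCell]
    split_ifs <;> ring

lemma outer_foldl_eq (P Q h_ : Int) (land : List (List Int)) (acc : Int) :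
    land.foldl (fun price row =>
      row.foldl (fun price targ =>
        if targ > h_ then price + (targ - h_) * Q
        else if targ < h_ then price + (h_ - targ) * P
        else price) price) acc
    = acc + ((land.flatMap (fun row => row)).map (pvCell P Q h_)).sum := by
  induction land generalizing acc with
  | nil => simp
  | cons r rs ih =>
    rw [List.foldl_cons, inner_foldl_eq, ih]
    simp only [List.flatMap_cons, List.map_append, List.sum_append]
    ring

-- binary-search invariant: the first loop preserves "left of lo is < h, right of hi is ≥ h"
lemma pvBsLt_spec (cells : List Int) (h_ : Int)
    (hsort : ∀ p q : Nat, p ≤ q → q < cells.length → cells.getD p 0 ≤ cells.getD q 0) :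
    ∀ lo hi : Int, 0 ≤ lo → lo ≤ hi → hi ≤ cells.length →
    (∀ k : Nat, (k : Int) < lo → cells.getD k 0 < h_) →
    (∀ k : Nat, hi ≤ (k : Int) → k < cells.length → ¬ cells.getD k 0 < h_) →
    0 ≤ pvBsLt cells h_ lo hi ∧ pvBsLt cells h_ lo hi ≤ cells.length ∧
    (∀ k : Nat, (k : Int) < pvBsLt cells h_ lo hi → cells.getD k 0 < h_) ∧
    (∀ k : Nat, pvBsLt cells h_ lo hi ≤ (k : Int) → k < cells.length → ¬ cells.getD k 0 < h_) := by
  have main : ∀ n : Nat, ∀ lo hi : Int, (hi - lo).toNat = n → 0 ≤ lo → lo ≤ hi → hi ≤ cells.length →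
      (∀ k : Nat, (k : Int) < lo → cells.getD k 0 < h_) →
      (∀ k : Nat, hi ≤ (k : Int) → k < cells.length → ¬ cells.getD k 0 < h_) →
      0 ≤ pvBsLt cells h_ lo hi ∧ pvBsLt cells h_ lo hi ≤ cells.length ∧
      (∀ k : Nat, (k : Int) < pvBsLt cells h_ lo hi → cells.getD k 0 < h_) ∧
      (∀ k : Nat, pvBsLt cells h_ lo hi ≤ (k : Int) → k < cells.length → ¬ cells.getD k 0 < h_) := by
    intro n
    induction n using Nat.strong_induction_on with
    | _ n ih =>
      intro lo hi hfuel h0 hle hhi hPlo hPhi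
      rw [pvBsLt]
      by_cases hlt : lo < hi
      · simp only [hlt, dif_pos]
        set mid := PySem.Int.floordiv (lo + hi) 2 with hmiddef
        have hmb := PySem.Int.floordiv_two_mid_bounds (le_of_lt hlt)
        have hmlt : mid < hi := by
          rw [hmiddef, PySem.Int.floordiv_lt_iff_lt_mul (by omega)]; omega
        have hmlen : mid.toNat < cells.length := by omega
        have hget : PySem.List.pyGetD cells mid 0 = cells.getD mid.toNat 0 := by
          rw [PySem.List.pyGetD_eq_getElem cells 0 (by omega) (by omega),
              List.getD_eq_getElem _ _ hmlen]
        by_cases hc : PySem.List.pyGetD cells mid 0 < h_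
        · simp only [hc, if_pos]
          apply ih (hi - (mid + 1)).toNat (by omega) _ _ rfl (by omega) (by omega) hhi
          · intro k hk
            have hk' : k ≤ mid.toNat := by omega
            have hs := hsort k mid.toNat hk' hmlen
            rw [hget] at hc
            omega
          · exact hPhi
        · simp only [hc, if_false]
          apply ih (mid - lo).toNat (by omega) _ _ rfl h0 (by omega) (by omega) hPlo
          intro k hk1 hk2
          have hk' : mid.toNat ≤ k := by omega
          have hs := hsort mid.toNat k hk' hk2
          rw [hget] at hc
          omega
      · simp only [hlt, dif_neg, not_false_iff]
        refine ⟨h0, by omega, ?_, ?_⟩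
        · intro k hk; exact hPlo k (by omega)
        · intro k hk1 hk2; exact hPhi k (by omega) hk2
  intro lo hi
  exact main (hi - lo).toNat lo hi rfl

-- same invariant for the second loop (predicate `≤ h`)
lemma pvBsLe_spec (cells : List Int) (h_ : Int)
    (hsort : ∀ p q : Nat, p ≤ q → q < cells.length → cells.getD p 0 ≤ cells.getD q 0) :
    ∀ lo hi : Int, 0 ≤ lo → lo ≤ hi → hi ≤ cells.length →
    (∀ k : Nat, (k : Int) < lo → cells.getD k 0 ≤ h_) →
    (∀ k : Nat, hi ≤ (k : Int) → k < cells.length → ¬ cells.getD k 0 ≤ h_) →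
    0 ≤ pvBsLe cells h_ lo hi ∧ pvBsLe cells h_ lo hi ≤ cells.length ∧
    (∀ k : Nat, (k : Int) < pvBsLe cells h_ lo hi → cells.getD k 0 ≤ h_) ∧
    (∀ k : Nat, pvBsLe cells h_ lo hi ≤ (k : Int) → k < cells.length → ¬ cells.getD k 0 ≤ h_) := by
  have main : ∀ n : Nat, ∀ lo hi : Int, (hi - lo).toNat = n → 0 ≤ lo → lo ≤ hi → hi ≤ cells.length →
      (∀ k : Nat, (k : Int) < lo → cells.getD k 0 ≤ h_) →
      (∀ k : Nat, hi ≤ (k : Int) → k < cells.length → ¬ cells.getD k 0 ≤ h_) →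
      0 ≤ pvBsLe cells h_ lo hi ∧ pvBsLe cells h_ lo hi ≤ cells.length ∧
      (∀ k : Nat, (k : Int) < pvBsLe cells h_ lo hi → cells.getD k 0 ≤ h_) ∧
      (∀ k : Nat, pvBsLe cells h_ lo hi ≤ (k : Int) → k < cells.length → ¬ cells.getD k 0 ≤ h_) := by
    intro n
    induction n using Nat.strong_induction_on with
    | _ n ih =>
      intro lo hi hfuel h0 hle hhi hPlo hPhi
      rw [pvBsLe]
      by_cases hlt : lo < hi
      · simp only [hlt, dif_pos]
        set mid := PySem.Int.floordiv (lo + hi) 2 with hmiddef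
        have hmb := PySem.Int.floordiv_two_mid_bounds (le_of_lt hlt)
        have hmlt : mid < hi := by
          rw [hmiddef, PySem.Int.floordiv_lt_iff_lt_mul (by omega)]; omega
        have hmlen : mid.toNat < cells.length := by omega
        have hget : PySem.List.pyGetD cells mid 0 = cells.getD mid.toNat 0 := by
          rw [PySem.List.pyGetD_eq_getElem cells 0 (by omega) (by omega),
              List.getD_eq_getElem _ _ hmlen]
        by_cases hc : PySem.List.pyGetD cells mid 0 ≤ h_
        · simp only [hc, if_pos]
          apply ih (hi - (mid + 1)).toNat (by omega) _ _ rfl (by omega) (by omega) hhi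
          · intro k hk
            have hk' : k ≤ mid.toNat := by omega
            have hs := hsort k mid.toNat hk' hmlen
            rw [hget] at hc
            omega
          · exact hPhi
        · simp only [hc, if_false]
          apply ih (mid - lo).toNat (by omega) _ _ rfl h0 (by omega) (by omega) hPlo
          intro k hk1 hk2
          have hk' : mid.toNat ≤ k := by omega
          have hs := hsort mid.toNat k hk' hk2
          rw [hget] at hc
          omega
      · simp only [hlt, dif_neg, not_false_iff]
        refine ⟨h0, by omega, ?_, ?_⟩
        · intro k hk; exact hPlo k (by omega)
        · intro k hk1 hk2; exact hPhi k (by omega) hk2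
  intro lo hi
  exact main (hi - lo).toNat lo hi rfl

-- a positional split point turns a prefix into a filter
lemma take_eq_filter_of_split (s : List Int) (P : Int → Bool) :
    ∀ r : Nat, r ≤ s.length →
    (∀ k : Nat, k < r → P (s.getD k 0)) →
    (∀ k : Nat, r ≤ k → k < s.length → ¬ P (s.getD k 0)) →
    s.take r = s.filter P := by
  induction s with
  | nil => intro r hr _ _; simp_all
  | cons x xs ih =>
    intro r hr h1 h2
    match r with
    | 0 =>
      have hall : ∀ a ∈ x :: xs, ¬ P a = true := by
        intro a ha
        obtain ⟨k, hk, rfl⟩ := List.mem_iff_getElem.mp ha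
        have := h2 k (Nat.zero_le _) hk
        rwa [List.getD_eq_getElem _ _ hk] at this
      simp [List.filter_eq_nil_iff.mpr hall]
    | r' + 1 =>
      have hx : P x = true := by simpa using h1 0 (Nat.succ_pos _)
      simp only [List.take_succ_cons, List.filter_cons, hx, if_pos]
      congr 1
      apply ih r' (by simpa using hr)
      · intro k hk; simpa using h1 (k + 1) (by omega)
      · intro k hk1 hk2; simpa using h2 (k + 1) (by omega) (by simpa using hk2)

-- and a positional split point turns a suffix into a filter
lemma drop_eq_filter_of_split (s : List Int) (P : Int → Bool) :
    ∀ r : Nat, r ≤ s.length →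
    (∀ k : Nat, k < r → ¬ P (s.getD k 0)) →
    (∀ k : Nat, r ≤ k → k < s.length → P (s.getD k 0)) →
    s.drop r = s.filter P := by
  induction s with
  | nil => intro r hr _ _; simp_all
  | cons x xs ih =>
    intro r hr h1 h2
    match r with
    | 0 =>
      have hall : ∀ a ∈ x :: xs, P a = true := by
        intro a ha
        obtain ⟨k, hk, rfl⟩ := List.mem_iff_getElem.mp ha
        have := h2 k (Nat.zero_le _) hk
        rwa [List.getD_eq_getElem _ _ hk] at this
      simp [List.filter_eq_self.mpr hall]
    | r' + 1 =>
      have hx : ¬ P x = true := by simpa using h1 0 (Nat.succ_pos _)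
      simp only [List.drop_succ_cons, List.filter_cons, hx]
      apply ih r' (by simpa using hr)
      · intro k hk; simpa using h1 (k + 1) (by omega)
      · intro k hk1 hk2; simpa using h2 (k + 1) (by omega) (by simpa using hk2)

lemma cell_sum_split (P Q h_ : Int) (cells : List Int) :
    (cells.map (pvCell P Q h_)).sum
    = ((cells.filter (fun c => decide (h_ < c))).sum - h_ * (cells.countP (fun c => decide (h_ < c)))) * Q
    + (h_ * (cells.countP (fun c => decide (c < h_))) - (cells.filter (fun c => decide (c < h_))).sum) * P := by
  induction cells with
  | nil => simp
  | cons x xs ih =>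
    simp only [List.map_cons, List.sum_cons, List.filter_cons, List.countP_cons, pvCell]
    by_cases h1 : h_ < x
    · have h2 : ¬ x < h_ := by omega
      simp only [h1, h2, decide_true, decide_false, if_pos, if_false, List.sum_cons]
      rw [ih]; push_cast; ring
    · by_cases h2 : x < h_
      · simp only [h1, h2, decide_true, decide_false, if_pos, if_false, List.sum_cons]
        rw [ih]; push_cast; ring
      · simp only [h1, h2, decide_false, if_false]
        rw [ih]; push_cast; ring

-- ===== VERDICT (by name: the statement is the Claim_ definition above) =====
theorem return_price_spec : Claim_equal_return_price := by
  intro land P Q h_ _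
  unfold Spec_return_price
  rw [return_price, outer_foldl_eq]
  set s := PySem.List.sorted (land.flatMap (fun row => row)) (fun c => c) false with hs
  have hperm : s.Perm (land.flatMap (fun row => row)) := PySem.List.sorted_perm _ _ _
  have hsum : ((land.flatMap (fun row => row)).map (pvCell P Q h_)).sum
      = (s.map (pvCell P Q h_)).sum := ((hperm.map (pvCell P Q h_)).sum_eq).symm
  have hsort : ∀ p q : Nat, p ≤ q → q < s.length → s.getD p 0 ≤ s.getD q 0 := by
    intro p q hpq hq
    rw [List.getD_eq_getElem _ _ (lt_of_le_of_lt hpq hq), List.getD_eq_getElem _ _ hq]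
    exact PySem.List.sorted_id_getElem_mono _ hpq hq
  obtain ⟨hi0, hiN, hiLt, hiGe⟩ :=
    pvBsLt_spec s h_ hsort 0 s.length (le_refl 0) (by omega) (by omega)
      (by intro k hk; omega) (by intro k hk1 hk2; omega)
  set i := pvBsLt s h_ 0 (s.length : Int) with hidef
  obtain ⟨hj0, hjN, hjLe, hjGt⟩ :=
    pvBsLe_spec s h_ hsort i s.length hi0 hiN (le_refl _)
      (fun k hk => le_of_lt (hiLt k hk)) (by intro k hk1 hk2; omega)
  set j := pvBsLe s h_ i (s.length : Int) with hjdef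
  have htake : s.take i.toNat = s.filter (fun c => decide (c < h_)) := by
    apply take_eq_filter_of_split s _ i.toNat (by omega)
    · intro k hk; simpa using hiLt k (by omega)
    · intro k hk1 hk2
      have := hiGe k (by omega) hk2
      simp only [decide_eq_true_eq]; omega
  have hdrop : s.drop j.toNat = s.filter (fun c => decide (h_ < c)) := by
    apply drop_eq_filter_of_split s _ j.toNat (by omega)
    · intro k hk
      have := hjLe k (by omega)
      simp only [decide_eq_true_eq]; omega
    · intro k hk1 hk2
      have := hjGt k (by omega) hk2
      simp only [decide_eq_true_eq]; omega
  have hcLt : (s.countP (fun c => decide (c < h_)) : Int) = i := by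
    rw [List.countP_eq_length_filter, ← htake, List.length_take]
    omega
  have hcGt : (s.countP (fun c => decide (h_ < c)) : Int) = (s.length : Int) - j := by
    rw [List.countP_eq_length_filter, ← hdrop, List.length_drop]
    omega
  rw [hsum, cell_sum_split, hcLt, hcGt]
  rw [return_price_alt]
  simp only [← hs, ← hidef, ← hjdef]
  rw [PySem.List.slice_to s hi0, PySem.List.slice_from s hj0, htake, hdrop]
  ring
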